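-- pv_equiv track=rewrite | github.com/tempifyOS/steganography-project | find runs test func thing v4.py | break_all_runs
-- ===== SOURCE A (Python) =====
-- def break_all_runs(s, M):
--     """Break all runs of length >= M by flipping their middle character."""
--     s = list(s)
--     i = 0
--     n = len(s)
--
--     while i < n:
--         run_char = s[i]
--         start = i
--         while i < n and s[i] == run_char:
--             i += 1
--         run_length = i - start
--
--         if run_length >= M:
--             mid = start + run_length // 2
--             s[mid] = '1' if s[mid] == '0' else '0'
--             i = start  # Restart from the beginning of the modified area
--
--     return ''.join(s)
-- ===== SOURCE B (Python) =====
-- def break_all_runs(s, M):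
--     """Break all runs of length >= M by flipping their middle character.
--
--     Run-length-encoding rewrite: keep the remaining text as a stack of
--     (char, count) runs, so splitting a long run and re-examining its left
--     half is O(1) arithmetic instead of rescanning characters.
--     """
--     # run-length encode s
--     runs = []
--     for ch in s:
--         if runs and runs[-1][0] == ch:
--             runs[-1][1] += 1
--         else:
--             runs.append([ch, 1])
--     runs.reverse()  # stack: top (= end of list) is the leftmost pending run
--     out = []
--     while runs:
--         c, k = runs[-1]
--         if k >= M:
--             runs.pop()
--             x = '1' if c == '0' else '0'
--             left = k // 2
--             right = k - left - 1
--             if right: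
--                 runs.append([c, right])
--             if runs and runs[-1][0] == x:
--                 runs[-1][1] += 1  # flipped char merges with what follows
--             else:
--                 runs.append([x, 1])
--             if left:
--                 runs.append([c, left])
--         else:
--             runs.pop()
--             out.append(c * k)
--     return ''.join(out)
-- ===== Notes on version B (the rewrite author's own statement) =====
-- stated objective: alternative
-- what changed: B run-length-encodes the string once and rewrites a stack of (char,count) runs, so splitting a long run and re-examining its left half is O(1) count arithmetic instead of A's character-by-character rescan of the run after every flip.
import Mathlib
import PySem

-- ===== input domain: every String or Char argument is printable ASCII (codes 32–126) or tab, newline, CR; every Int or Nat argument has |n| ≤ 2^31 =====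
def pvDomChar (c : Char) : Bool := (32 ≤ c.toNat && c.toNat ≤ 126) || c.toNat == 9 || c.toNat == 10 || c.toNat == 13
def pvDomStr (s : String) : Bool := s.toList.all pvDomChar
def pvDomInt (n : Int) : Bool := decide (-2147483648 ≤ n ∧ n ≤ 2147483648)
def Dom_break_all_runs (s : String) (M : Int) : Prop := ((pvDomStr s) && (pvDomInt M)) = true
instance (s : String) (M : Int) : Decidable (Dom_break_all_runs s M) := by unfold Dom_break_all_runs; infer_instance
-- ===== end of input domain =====

-- B replaces A's character-array loop (which rescans a run after every flip) by a
-- run-length-encoded stack, so each flip is O(1) run arithmetic; objective: alternative.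
-- Both loop ports are fueled with (n+1)^2 (a bound on A's outer steps whenever Python A
-- terminates, i.e. M ≥ 2 or s empty); on equal fuel the ports agree at exhaustion too.

-- ===== PORT A =====
-- inner while: 'while i < n and s[i] == run_char: i += 1' (short-circuit 'and')
def scanRunA (s : List Char) (c : Char) (j : Nat) : Nat :=
  if h : j < s.length then
    if s[j] = c then scanRunA s c (j + 1) else j
  else j
termination_by s.length - j
decreasing_by omega

-- outer while loop of A, fueled; state = (mutable char list s, index i)
def loopA (fuel : Nat) (M : Int) (s : List Char) (i : Nat) : List Char :=
  match fuel with
  | 0 => s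
  | fuel + 1 =>
    if i < s.length then
      let c := s[i]!                    -- run_char = s[i]
      let j := scanRunA s c i           -- inner while
      let k := j - i                    -- run_length
      if M ≤ (k : Int) then
        let mid := i + k / 2
        let s' := s.set mid (if s[mid]! = '0' then '1' else '0')
        loopA fuel M s' i               -- i = start: restart at run start
      else
        loopA fuel M s j
    else s

def break_all_runs (s : String) (M : Int) : String :=
  String.mk (loopA ((s.toList.length + 1) * (s.toList.length + 1)) M s.toList 0)

-- ===== PORT B =====
-- Source B keeps the run stack in a python list with its top at the end; the Lean list
-- mirrors that stack with its TOP AT THE HEAD (cons = append, head = runs[-1]).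
def encStepB (runs : List (Char × Nat)) (ch : Char) : List (Char × Nat) :=
  match runs with
  | (d, m) :: t => if d = ch then (d, m + 1) :: t else (ch, 1) :: (d, m) :: t
  | [] => [(ch, 1)]

-- 'for ch in reversed(s): bump-or-push' — leftmost run ends on top of the stack
def encodeB (s : List Char) : List (Char × Nat) :=
  s.reverse.foldl encStepB []

-- ''.join for pending runs (only used as the fuel-exhaustion fallback)
def decodeB (runs : List (Char × Nat)) : List Char :=
  (runs.map (fun r => List.replicate r.2 r.1)).flatten

-- main while loop of Source B, fueled with the same fuel as A's port
def loopB (fuel : Nat) (M : Int) (runs : List (Char × Nat)) (out : List Char) : List Char :=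
  match fuel with
  | 0 => out ++ decodeB runs
  | fuel + 1 =>
    match runs with
    | [] => out
    | (c, k) :: rs =>
      if M ≤ (k : Int) then
        let x := if c = '0' then '1' else '0'
        let left := k / 2
        let right := k - left - 1
        let rs1 := if right ≠ 0 then (c, right) :: rs else rs
        let rs2 := match rs1 with
          | (d, m) :: t => if d = x then (d, m + 1) :: t else (x, 1) :: (d, m) :: t
          | [] => [(x, 1)]
        let rs3 := if left ≠ 0 then (c, left) :: rs2 else rs2
        loopB fuel M rs3 out
      else
        loopB fuel M rs (out ++ List.replicate k c)

def break_all_runs_alt (s : String) (M : Int) : String :=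
  String.mk (loopB ((s.toList.length + 1) * (s.toList.length + 1)) M (encodeB s.toList) [])

-- ===== PRECONDITION & SPEC =====
def Spec_break_all_runs (s : String) (M : Int) (out : String) : Prop := out = break_all_runs_alt s M
instance (s : String) (M : Int) (out : String) : Decidable (Spec_break_all_runs s M out) := by unfold Spec_break_all_runs; infer_instance

-- ===== CLAIM (what is proved, stated in full; the proofs are below) =====
def Claim_equal_break_all_runs : Prop := ∀ (s : String) (M : Int), Dom_break_all_runs s M → Spec_break_all_runs s M (break_all_runs s M)

-- ===== LEMMAS AND PROOFS =====

-- invariant of the run stack: adjacent runs carry distinct characters, all counts ≥ 1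
def InvB (runs : List (Char × Nat)) : Prop :=
  List.IsChain (fun a b => a.1 ≠ b.1) runs ∧ ∀ r ∈ runs, 1 ≤ r.2

theorem invB_nil : InvB [] := ⟨by simp, by simp⟩

theorem invB_cons (c : Char) (k : Nat) (rs : List (Char × Nat)) (h : InvB rs) (hk : 1 ≤ k)
    (hne : ∀ p, rs.head? = some p → p.1 ≠ c) : InvB ((c, k) :: rs) := by
  refine ⟨List.IsChain.cons h.1 ?_, ?_⟩
  · intro y hy
    exact fun hc => (hne y hy) (by rw [← hc])
  · intro r hr
    rcases List.mem_cons.1 hr with h1 | h1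
    · subst h1; exact hk
    · exact h.2 r h1

theorem invB_tail (c : Char) (k : Nat) (rs : List (Char × Nat)) (h : InvB ((c, k) :: rs)) :
    InvB rs := ⟨h.1.of_cons, fun r hr => h.2 r (List.mem_cons_of_mem _ hr)⟩

theorem invB_head_ne (c : Char) (k : Nat) (rs : List (Char × Nat)) (h : InvB ((c, k) :: rs)) :
    ∀ p, rs.head? = some p → p.1 ≠ c := by
  intro p hp
  match rs with
  | [] => simp at hp
  | q :: t =>
    simp at hp
    subst hp
    exact fun he => (h.1.rel_head) he.symm

theorem decodeB_cons (c : Char) (k : Nat) (rs : List (Char × Nat)) :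
    decodeB ((c, k) :: rs) = List.replicate k c ++ decodeB rs := by
  simp [decodeB]

theorem decodeB_head (rs : List (Char × Nat)) (d : Char) (m : Nat) (t : List (Char × Nat))
    (hrs : rs = (d, m) :: t) (hm : 1 ≤ m) : (decodeB rs).head? = some d := by
  subst hrs
  cases m with
  | zero => omega
  | succ m => simp [decodeB_cons, List.replicate_succ]

theorem encStepB_decode (runs : List (Char × Nat)) (ch : Char) :
    decodeB (encStepB runs ch) = ch :: decodeB runs := by
  match runs with
  | [] => simp [encStepB, decodeB]
  | (d, m) :: t =>
    simp only [encStepB]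
    split
    · rename_i h; subst h; simp [decodeB_cons, List.replicate_succ]
    · simp [decodeB_cons]

theorem encStepB_inv (runs : List (Char × Nat)) (ch : Char) (h : InvB runs) :
    InvB (encStepB runs ch) := by
  match runs with
  | [] => exact ⟨by simp [encStepB], by simp [encStepB]⟩
  | (d, m) :: t =>
    simp only [encStepB]
    split
    · refine ⟨?_, ?_⟩
      · cases t with
        | nil => simp
        | cons q t' =>
          have hcc := List.isChain_cons_cons.mp h.1
          exact List.isChain_cons_cons.mpr ⟨hcc.1, hcc.2⟩
      intro r hr
      rcases List.mem_cons.1 hr with h1 | h1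
      · subst h1; omega
      · exact h.2 r (List.mem_cons_of_mem _ h1)
    · rename_i hne
      refine invB_cons _ _ _ h (by omega) ?_
      intro p hp
      simp at hp
      subst hp
      exact hne

theorem foldl_encStepB (r : List Char) (acc : List (Char × Nat)) (h : InvB acc) :
    InvB (r.foldl encStepB acc) ∧ decodeB (r.foldl encStepB acc) = r.reverse ++ decodeB acc := by
  induction r generalizing acc with
  | nil => simpa using h
  | cons a r ih =>
    obtain ⟨h1, h2⟩ := ih (encStepB acc a) (encStepB_inv acc a h)
    refine ⟨h1, ?_⟩
    simp [h2, encStepB_decode]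

theorem encodeB_inv (l : List Char) : InvB (encodeB l) :=
  (foldl_encStepB l.reverse [] invB_nil).1

theorem encodeB_decode (l : List Char) : decodeB (encodeB l) = l := by
  have h := (foldl_encStepB l.reverse [] invB_nil).2
  rw [encodeB, h]
  simp [decodeB]

theorem head?_drop_of (s : List Char) (i : Nat) (h : i < s.length) :
    (s.drop i).head? = some s[i] := by
  have h0 : 0 < (s.drop i).length := by simp; omega
  rw [List.head?_eq_getElem?, List.getElem?_eq_getElem h0]
  simp [List.getElem_drop]

-- the inner while of A scans exactly the head run
theorem scanRunA_spec (s : List Char) (c : Char) (k : Nat) :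
    ∀ (i : Nat) (t : List Char), s.drop i = List.replicate k c ++ t →
    (∀ d, t.head? = some d → d ≠ c) → scanRunA s c i = i + k := by
  induction k with
  | zero =>
    intro i t hdrop hhd
    simp only [List.replicate_zero, List.nil_append] at hdrop
    rw [scanRunA]
    split
    · rename_i hlt
      have h0 := head?_drop_of s i hlt
      rw [hdrop] at h0
      rw [if_neg (hhd s[i] h0), Nat.add_zero]
    · omega
  | succ k ih =>
    intro i t hdrop hhd
    have hlen : i < s.length := by
      by_contra h
      have : s.drop i = [] := List.drop_eq_nil_iff.2 (by omega)
      rw [this] at hdrop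
      simp [List.replicate_succ] at hdrop
    have hget : s[i] = c := by
      have h0 := head?_drop_of s i hlen
      rw [hdrop] at h0
      simp [List.replicate_succ] at h0
      exact h0.symm
    rw [scanRunA, dif_pos hlen, if_pos hget]
    have hdrop' : s.drop (i + 1) = List.replicate k c ++ t := by
      have h1 : s.drop (i + 1) = (s.drop i).drop 1 := by rw [List.drop_drop]
      rw [h1, hdrop]
      simp [List.replicate_succ]
    rw [ih (i + 1) t hdrop' hhd]
    omega

theorem getElem_bang_of_drop (s : List Char) (i p k : Nat) (c : Char) (t : List Char)
    (hdrop : s.drop i = List.replicate k c ++ t) (hp : p < k) : s[i + p]! = c := by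
  have hlen : i + p < s.length := by
    have h1 := congrArg List.length hdrop
    simp at h1
    omega
  rw [getElem!_pos s (i + p) hlen]
  have hp' : p < (s.drop i).length := by simp; omega
  calc s[i + p] = (s.drop i)[p]'hp' := List.getElem_drop.symm
    _ = (List.replicate k c ++ t)[p]'(by simp; omega) := List.getElem_of_eq hdrop hp'
    _ = c := by rw [List.getElem_append_left (by simpa using hp)]; simp

theorem replicate_set (k : Nat) (c x : Char) :
    ∀ p, p < k → (List.replicate k c).set p x =
      List.replicate p c ++ x :: List.replicate (k - p - 1) c := by
  induction k with
  | zero => omega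
  | succ k ihk =>
    intro p hp
    cases p with
    | zero => simp [List.replicate_succ]
    | succ l =>
      simp only [List.replicate_succ, List.set]
      rw [ihk l (by omega)]
      simp

-- the coupling: B's (runs, out) tracks A's (s, i) step for step, on ANY common fuel
theorem loop_coupling (fuel : Nat) (M : Int) :
    ∀ (s : List Char) (i : Nat) (runs : List (Char × Nat)) (out : List Char),
    InvB runs → out = s.take i → decodeB runs = s.drop i →
    loopB fuel M runs out = loopA fuel M s i := by
  induction fuel with
  | zero =>
    intro s i runs out _ hout hdec
    simp only [loopB, loopA]
    rw [hout, hdec, List.take_append_drop]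
  | succ fuel ih =>
    intro s i runs out hinv hout hdec
    match hruns : runs with
    | [] =>
      have hnil : s.drop i = [] := by rw [← hdec]; simp [decodeB]
      have hlen : s.length ≤ i := List.drop_eq_nil_iff.1 hnil
      simp only [loopB, loopA]
      rw [if_neg (by omega)]
      rw [hout, List.take_of_length_le hlen]
    | (c, k) :: rs =>
      have hk1 : 1 ≤ k := hinv.2 (c, k) (by simp)
      have hinv' : InvB rs := invB_tail c k rs hinv
      have hdec' : s.drop i = List.replicate k c ++ decodeB rs := by
        rw [← hdec, decodeB_cons]
      have hhd : ∀ d, (decodeB rs).head? = some d → d ≠ c := by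
        intro d hd
        match hrs : rs with
        | [] => simp [decodeB] at hd
        | (d', m') :: t' =>
          have hm' : 1 ≤ m' := hinv'.2 (d', m') (by simp)
          have hh := decodeB_head _ d' m' t' rfl hm'
          rw [hh] at hd
          have hdd : d = d' := by injection hd with h; exact h.symm
          subst hdd
          exact invB_head_ne c k _ hinv (d, m') rfl
      have hlen : i < s.length := by
        by_contra h
        have hn : s.drop i = [] := List.drop_eq_nil_iff.2 (by omega)
        rw [hn] at hdec'
        have := congrArg List.length hdec'
        simp at this
        omega
      have hgi : s[i]! = c := by
        have := getElem_bang_of_drop s i 0 k c (decodeB rs) hdec' (by omega)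
        simpa using this
      have hscan : scanRunA s c i = i + k := scanRunA_spec s c k i (decodeB rs) hdec' hhd
      simp only [loopA, loopB]
      rw [if_pos hlen, hgi, hscan]
      have hks : i + k - i = k := by omega
      rw [hks]
      by_cases hM : M ≤ (k : Int)
      · rw [if_pos hM, if_pos hM]
        -- flip step: A restarts at i with s[i + k/2] flipped; B splits the head run
        have hp : k / 2 < k := Nat.div_lt_self (by omega) (by omega)
        have hmidget : s[i + k / 2]! = c :=
          getElem_bang_of_drop s i (k / 2) k c (decodeB rs) hdec' hp
        rw [hmidget]
        set x := if c = '0' then '1' else '0' with hx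
        have hxc : x ≠ c := by
          rw [hx]
          split
          · rename_i h; rw [h]; decide
          · rename_i h; exact fun he => h he.symm
        set left := k / 2 with hleft
        set right := k - left - 1 with hright
        set rs1 := if right ≠ 0 then (c, right) :: rs else rs with hrs1
        set rs2 := (match rs1 with
          | (d, m) :: t => if d = x then (d, m + 1) :: t else (x, 1) :: (d, m) :: t
          | [] => [(x, 1)]) with hrs2
        set rs3 := if left ≠ 0 then (c, left) :: rs2 else rs2 with hrs3
        set s' := s.set (i + left) x with hs'
        have hd1 : decodeB rs1 = List.replicate right c ++ decodeB rs := by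
          rw [hrs1]; split
          · rw [decodeB_cons]
          · rename_i h; simp at h; rw [h]; simp
        have hd2 : decodeB rs2 = x :: decodeB rs1 := by
          rw [hrs2]
          match hr1 : rs1 with
          | [] => simp [decodeB]
          | (d, m) :: t =>
            simp only
            split
            · rename_i h; subst h
              rw [decodeB_cons, decodeB_cons, List.replicate_succ]; simp
            · rw [decodeB_cons, decodeB_cons]; simp
        have hd3 : decodeB rs3 = List.replicate left c ++ decodeB rs2 := by
          rw [hrs3]; split
          · rw [decodeB_cons]
          · rename_i h; simp at h; rw [h]; simp
        have hset : s'.drop i = decodeB rs3 := by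
          rw [hs', ← List.set_drop, hdec', hd3, hd2, hd1]
          rw [List.set_append_left _ _ (by simpa using hp)]
          rw [replicate_set k c x left hp, ← hright]
          simp
        have htake : s'.take i = s.take i := by
          rw [hs']
          exact List.take_set_of_le (by omega)
        have hinv1 : InvB rs1 := by
          rw [hrs1]; split
          · rename_i hz
            exact invB_cons c right rs hinv' (by omega) (invB_head_ne c k rs hinv)
          · exact hinv'
        have hinv2 : InvB rs2 ∧ ∀ p, rs2.head? = some p → p.1 = x := by
          rw [hrs2]
          match hr1 : rs1 with
          | [] =>
            refine ⟨⟨by simp, by simp⟩, ?_⟩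
            intro p hp2
            simp at hp2
            subst hp2
            rfl
          | (d, m) :: t =>
            simp only
            split
            · rename_i h
              refine ⟨⟨?_, ?_⟩, ?_⟩
              · cases t with
                | nil => simp
                | cons q t2 =>
                  have hcc := List.isChain_cons_cons.mp hinv1.1
                  exact List.isChain_cons_cons.mpr ⟨hcc.1, hcc.2⟩
              · intro r hr
                rcases List.mem_cons.1 hr with h1 | h1
                · subst h1; omega
                · exact hinv1.2 r (List.mem_cons_of_mem _ h1)
              · intro p hp2
                simp at hp2
                subst hp2
                exact h
            · rename_i h
              refine ⟨invB_cons x 1 _ hinv1 (by omega) ?_, ?_⟩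
              · intro p hp2
                simp at hp2
                subst hp2
                exact h
              · intro p hp2
                simp at hp2
                subst hp2
                rfl
        have hinv3 : InvB rs3 := by
          rw [hrs3]; split
          · rename_i hz
            refine invB_cons c left rs2 hinv2.1 (by omega) ?_
            intro p hp2
            rw [hinv2.2 p hp2]
            exact hxc
          · exact hinv2.1
        exact ih s' i rs3 out hinv3 (by rw [htake, hout]) hset.symm
      · rw [if_neg hM, if_neg hM]
        -- advance step: A moves i past the run; B pops it onto the output
        have hout' : out ++ List.replicate k c = s.take (i + k) := by
          rw [List.take_add, hout]
          congr 1
          rw [hdec', List.take_append_of_le_length (by simp)]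
          simp
        have hdec2 : decodeB rs = s.drop (i + k) := by
          have h1 : s.drop (i + k) = (s.drop i).drop k := by rw [List.drop_drop]
          rw [h1, hdec', List.drop_append_of_le_length (by simp)]
          simp
        exact ih s (i + k) rs (out ++ List.replicate k c) hinv' hout' hdec2

-- ===== VERDICT (by name: the statement is the Claim_ definition above) =====
theorem break_all_runs_spec : Claim_equal_break_all_runs := by
  intro s M _
  unfold Spec_break_all_runs break_all_runs break_all_runs_alt
  congr 1
  exact (loop_coupling _ M s.toList 0 (encodeB s.toList) []
    (encodeB_inv s.toList) (by simp) (by simp [encodeB_decode])).symm
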